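-- pv_equiv track=rewrite | github.com/xingnix/learning | machinelearning/python/logic/hat_in_BW.py | answers
-- ===== SOURCE A (Python) =====
-- def answers(max_number_of_black_hat,l):
--     if l==[]:
--         black_answer="T"
--         return answers(max_number_of_black_hat,[["T",black_answer[0:-1]+"FT"]])
--     elif len(l)<max_number_of_black_hat:
--         previous_round_black_answer=l[-1][0]
--         b=previous_round_black_answer[0:-1]+"FT"
--         w=b[0:-1]+"FT"
--         return answers(max_number_of_black_hat,l+[[b,w]])
--     else:
--         return l
-- ===== SOURCE B (Python) =====
-- def answers(max_number_of_black_hat, l):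
--     cur = [["T", "FT"]] if l == [] else list(l)
--     while len(cur) < max_number_of_black_hat:
--         prev = cur[-1][0]
--         b = prev[:-1] + "FT"
--         w = b[:-1] + "FT"
--         cur = cur + [[b, w]]
--     return cur
-- ===== Notes on version B (the rewrite author's own statement) =====
-- stated objective: simpler
-- what changed: Replaces A's tail recursion (which re-enters the function once per appended pair) with a single seed-then-while loop that appends pairs iteratively; the seed "FT" is written directly instead of computed as "T"[0:-1]+"FT".
import Mathlib
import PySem

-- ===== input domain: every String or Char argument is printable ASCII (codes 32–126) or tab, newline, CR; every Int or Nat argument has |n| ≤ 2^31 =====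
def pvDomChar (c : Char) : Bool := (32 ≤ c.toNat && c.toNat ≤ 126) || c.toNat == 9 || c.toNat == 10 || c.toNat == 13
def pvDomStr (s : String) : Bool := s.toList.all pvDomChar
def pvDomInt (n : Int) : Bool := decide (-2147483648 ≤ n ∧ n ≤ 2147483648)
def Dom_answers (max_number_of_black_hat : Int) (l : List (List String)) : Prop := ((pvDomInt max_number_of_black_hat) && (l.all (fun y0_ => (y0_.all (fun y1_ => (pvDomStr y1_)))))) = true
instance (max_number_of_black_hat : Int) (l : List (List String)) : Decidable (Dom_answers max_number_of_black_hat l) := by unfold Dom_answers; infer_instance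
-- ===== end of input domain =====

-- B replaces A's tail recursion by a seed-then-while loop that appends one pair per
-- iteration (objective: simpler decomposition; same values, same order, no mutation).

-- ===== PORT A =====
def answers (max_number_of_black_hat : Int) (l : List (List String)) : List (List String) :=
  if l = [] then
    -- black_answer = "T"; recurse with [["T", black_answer[0:-1] + "FT"]]
    answers max_number_of_black_hat [["T", PySem.Str.slice "T" (some 0) (some (-1)) ++ "FT"]]
  else if (l.length : Int) < max_number_of_black_hat then
    -- previous_round_black_answer = l[-1][0]  (IndexError when the last inner list is empty: outside Pre_)
    let prev := (PySem.List.pyGet? ((PySem.List.pyGet? l (-1)).getD []) 0).getD ""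
    let b := PySem.Str.slice prev (some 0) (some (-1)) ++ "FT"
    let w := PySem.Str.slice b (some 0) (some (-1)) ++ "FT"
    answers max_number_of_black_hat (l ++ [[b, w]])
  else
    l
termination_by (max_number_of_black_hat - l.length).toNat + (if l = [] then 1 else 0)
decreasing_by all_goals (simp_all; try omega)

-- ===== PORT B =====
-- one loop iteration: append the next [b, w] pair derived from the last pair's first string
def altStep (cur : List (List String)) : List (List String) :=
  let prev := (PySem.List.pyGet? ((PySem.List.pyGet? cur (-1)).getD []) 0).getD ""
  let b := PySem.Str.slice prev (some 0) (some (-1)) ++ "FT"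
  let w := PySem.Str.slice b (some 0) (some (-1)) ++ "FT"
  cur ++ [[b, w]]

-- the while loop runs exactly (max - len cur).toNat times, since each pass appends one pair
def altLoop : Nat → List (List String) → List (List String)
  | 0, cur => cur
  | n + 1, cur => altLoop n (altStep cur)

def answers_alt (max_number_of_black_hat : Int) (l : List (List String)) : List (List String) :=
  let cur := if l = [] then [["T", "FT"]] else l
  altLoop (max_number_of_black_hat - cur.length).toNat cur

-- ===== PRECONDITION & SPEC =====
-- Pre_ excludes the inputs on which Python A raises: IndexError (l[-1][0] with an empty
-- last inner list while more pairs are still to be generated; B raises there too) and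
-- RecursionError (A recurses once per appended pair, so it overflows CPython's stack when
-- more than ~997 pairs are to be generated; the 990 cap leaves a small safety margin for
-- already-used stack, so it can also exclude a few deep inputs A happens to survive).
def Pre_answers (max_number_of_black_hat : Int) (l : List (List String)) : Prop :=
  (l = [] ∨ max_number_of_black_hat ≤ (l.length : Int) ∨ l.getLast? ≠ some []) ∧
  max_number_of_black_hat - (l.length : Int) ≤ 990
instance (max_number_of_black_hat : Int) (l : List (List String)) : Decidable (Pre_answers max_number_of_black_hat l) := by unfold Pre_answers; infer_instance

def pvWitness_answers : Int × List (List String) := (3, [["T", "FT"]])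

def Spec_answers (max_number_of_black_hat : Int) (l : List (List String)) (out : List (List String)) : Prop := out = answers_alt max_number_of_black_hat l
instance (max_number_of_black_hat : Int) (l : List (List String)) (out : List (List String)) : Decidable (Spec_answers max_number_of_black_hat l out) := by unfold Spec_answers; infer_instance

-- ===== CLAIM (what is proved, stated in full; the proofs are below) =====
def Claim_equal_answers : Prop := ∀ (max_number_of_black_hat : Int) (l : List (List String)), Dom_answers max_number_of_black_hat l → Pre_answers max_number_of_black_hat l → Spec_answers max_number_of_black_hat l (answers max_number_of_black_hat l)

-- ===== LEMMAS AND PROOFS =====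

theorem answers_eq_altLoop (m : Int) : ∀ (n : Nat) (l : List (List String)), l ≠ [] →
    (m - l.length).toNat = n → answers m l = altLoop n l := by
  intro n
  induction n with
  | zero =>
    intro l hne h0
    rw [answers]
    simp only [hne, if_false, altLoop]
    have : ¬ ((l.length : Int) < m) := by omega
    simp [this]
  | succ k ih =>
    intro l hne hn
    have hlt : (l.length : Int) < m := by omega
    rw [answers]
    simp only [hne, if_false, hlt, if_true]
    have hstep : altStep l ≠ [] := by simp [altStep]
    have hlen : (m - (altStep l).length).toNat = k := by
      simp [altStep]; omega
    calc answers m (altStep l) = altLoop k (altStep l) := ih (altStep l) hstep hlen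
      _ = altLoop (k + 1) l := rfl

theorem seed_eq : PySem.Str.slice "T" (some 0) (some (-1)) ++ "FT" = "FT" := by decide

-- ===== VERDICT (by name: the statement is the Claim_ definition above) =====
theorem answers_spec : Claim_equal_answers := by
  intro m l _ _
  unfold Spec_answers answers_alt
  by_cases hl : l = []
  · subst hl
    rw [answers]
    simp only [if_true, seed_eq]
    exact answers_eq_altLoop m _ _ (by simp) rfl
  · simp only [hl, if_false]
    exact answers_eq_altLoop m _ l hl rfl
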